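-- pv_equiv track=rewrite | github.com/UISSH/backend | base/utils/format.py | format_os_query_result
-- ===== SOURCE A (Python) =====
-- def format_os_query_result(data) -> str:
--     lines = data.split("\n")
--     start_position = 0
--     for index, item in enumerate(lines):
--         if item.startswith("["):
--             start_position = index
--             break
--     data = "\n".join(lines[start_position:])
--
--     return data
-- ===== SOURCE B (Python) =====
-- def format_os_query_result(data) -> str:
--     if data.startswith("["):
--         return data
--     idx = data.find("\n[")
--     if idx == -1:
--         return data
--     return data[idx + 1:]
-- ===== Notes on version B (the rewrite author's own statement) =====
-- stated objective: simpler
-- what changed: B works on the raw string with a single search for a newline immediately followed by an opening bracket and one slice, instead of splitting into a list of lines, scanning it with an index loop, and joining a sublist back together.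
import Mathlib
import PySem

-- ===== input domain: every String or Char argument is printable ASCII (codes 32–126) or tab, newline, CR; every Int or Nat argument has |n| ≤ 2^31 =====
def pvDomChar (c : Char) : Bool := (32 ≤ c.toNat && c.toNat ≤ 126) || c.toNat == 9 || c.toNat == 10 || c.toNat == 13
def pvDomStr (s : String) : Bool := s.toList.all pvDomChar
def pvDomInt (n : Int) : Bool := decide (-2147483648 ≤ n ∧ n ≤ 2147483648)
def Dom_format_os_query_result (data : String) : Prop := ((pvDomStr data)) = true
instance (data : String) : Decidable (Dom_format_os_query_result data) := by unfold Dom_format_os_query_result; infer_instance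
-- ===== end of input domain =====

-- B trims everything before the first line starting with '[' by one raw-string find of "\n[" and a slice,
-- instead of A's split-into-lines / index-scan / join; objective: simpler.


-- ===== PORT A =====
-- the for-enumerate loop with break: first index whose line starts with "[", else the initial 0
def faLoop : List (Int × String) → Int
  | [] => 0
  | (i, item) :: rest => if PySem.Str.startswith item "[" then i else faLoop rest

def format_os_query_result (data : String) : String :=
  let lines := (PySem.Str.split? data "\n").getD []
  let start_position := faLoop (PySem.List.enumerate lines 0)
  PySem.Str.join "\n" (PySem.List.slice lines (some start_position) none)

-- ===== PORT B =====
def format_os_query_result_alt (data : String) : String :=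
  if PySem.Str.startswith data "[" then data
  else
    let idx := PySem.Str.find data "\n["
    if idx = -1 then data
    else PySem.Str.slice data (some (idx + 1)) none

-- ===== PRECONDITION & SPEC =====
def Spec_format_os_query_result (data : String) (out : String) : Prop := out = format_os_query_result_alt data
instance (data : String) (out : String) : Decidable (Spec_format_os_query_result data out) := by unfold Spec_format_os_query_result; infer_instance

-- ===== CLAIM (what is proved, stated in full; the proofs are below) =====
def Claim_equal_format_os_query_result : Prop := ∀ (data : String), Dom_format_os_query_result data → Spec_format_os_query_result data (format_os_query_result data)

-- ===== LEMMAS AND PROOFS =====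

-- Python's s.split("\n") as a direct structural recursion
def splitNl : List Char → List (List Char)
  | [] => [[]]
  | c :: r =>
    if c = '\n' then [] :: splitNl r
    else
      match splitNl r with
      | [] => [[c]]
      | h :: t => (c :: h) :: t

def consHead (pre : List Char) : List (List Char) → List (List Char)
  | [] => [pre]
  | h :: t => (pre ++ h) :: t

-- first index of a line starting with '[' (the list-level meaning of A's loop)
def kOf (M : List (List Char)) : Nat := (M.findIdx? (fun l => ['['].isPrefixOf l)).getD 0

-- B at the character-list level
def bC (s : List Char) : List Char :=
  if ['['].isPrefixOf s then s
  else if PySem.Chars.find s ['\n', '['] = -1 then s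
  else s.drop (PySem.Chars.find s ['\n', '['] + 1).toNat

theorem splitNl_ne_nil (s : List Char) : splitNl s ≠ [] := by
  cases s with
  | nil => simp [splitNl]
  | cons c r =>
    simp only [splitNl]
    split
    · simp
    · cases h : splitNl r <;> simp

theorem splitOn_go_eq (fuel : Nat) (l cur : List Char) (acc : List (List Char))
    (h : l.length ≤ fuel) :
    PySem.Chars.splitOn.go ['\n'] fuel l cur acc = acc.reverse ++ consHead cur.reverse (splitNl l) := by
  induction fuel generalizing l cur acc with
  | zero =>
    have hl : l = [] := List.length_eq_zero_iff.mp (Nat.le_zero.mp h)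
    subst hl
    rw [PySem.Chars.splitOn.go]; simp [splitNl, consHead]
  | succ fuel ih =>
    cases l with
    | nil =>
      rw [PySem.Chars.splitOn.go]
      simp [splitNl, consHead]
      omega
    | cons c rest =>
      rw [PySem.Chars.splitOn.go]
      by_cases hc : c = '\n'
      · subst hc
        simp only [List.isPrefixOf, BEq.rfl, Bool.true_and, if_true]
        have hdrop : List.drop (['\n'] : List Char).length ('\n' :: rest) = rest := by simp
        rw [hdrop]
        rw [ih rest [] (cur.reverse :: acc) (by simpa using Nat.le_of_succ_le_succ (by simpa using h))]
        obtain ⟨h1, t1, hsp⟩ : ∃ h1 t1, splitNl rest = h1 :: t1 := by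
          cases hs : splitNl rest with
          | nil => exact absurd hs (splitNl_ne_nil rest)
          | cons a b => exact ⟨a, b, rfl⟩
        simp [splitNl, hsp, consHead]
      · have : (['\n'].isPrefixOf (c :: rest)) = false := by
          simp [List.isPrefixOf]; intro hcc; exact hc (by simpa using hcc.symm)
        simp only [this, if_false]
        rw [ih rest (c :: cur) acc (by simpa using Nat.le_of_succ_le_succ (by simpa using h))]
        obtain ⟨h1, t1, hsp⟩ : ∃ h1 t1, splitNl rest = h1 :: t1 := by
          cases hs : splitNl rest with
          | nil => exact absurd hs (splitNl_ne_nil rest)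
          | cons a b => exact ⟨a, b, rfl⟩
        simp [splitNl, hc, hsp, consHead]

theorem splitOn_eq_splitNl (s : List Char) : PySem.Chars.splitOn s ['\n'] = splitNl s := by
  unfold PySem.Chars.splitOn
  rw [splitOn_go_eq (s.length + 1) s [] [] (by omega)]
  obtain ⟨h1, t1, hsp⟩ : ∃ h1 t1, splitNl s = h1 :: t1 := by
    cases hs : splitNl s with
    | nil => exact absurd hs (splitNl_ne_nil s)
    | cons a b => exact ⟨a, b, rfl⟩
  simp [hsp, consHead]

theorem join_cons_head (c : Char) (h : List Char) (t : List (List Char)) :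
    PySem.Chars.join ['\n'] ((c :: h) :: t) = c :: PySem.Chars.join ['\n'] (h :: t) := by
  cases t with
  | nil => simp [PySem.Chars.join_singleton]
  | cons h2 t2 => simp [PySem.Chars.join_cons_cons]

theorem join_splitNl (s : List Char) : PySem.Chars.join ['\n'] (splitNl s) = s := by
  induction s with
  | nil => simp [splitNl, PySem.Chars.join_singleton]
  | cons c r ih =>
    by_cases hc : c = '\n'
    · subst hc
      obtain ⟨h1, t1, hsp⟩ : ∃ h1 t1, splitNl r = h1 :: t1 := by
        cases hs : splitNl r with
        | nil => exact absurd hs (splitNl_ne_nil r)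
        | cons a b => exact ⟨a, b, rfl⟩
      simp only [splitNl, if_true, hsp] at *
      rw [PySem.Chars.join_cons_cons]
      simpa using ih
    · obtain ⟨h1, t1, hsp⟩ : ∃ h1 t1, splitNl r = h1 :: t1 := by
        cases hs : splitNl r with
        | nil => exact absurd hs (splitNl_ne_nil r)
        | cons a b => exact ⟨a, b, rfl⟩
      simp only [splitNl, hc, if_false, hsp] at *
      rw [join_cons_head]
      simpa using ih

theorem splitNl_nlfree (s : List Char) : ∀ l ∈ splitNl s, '\n' ∉ l := by
  induction s with
  | nil => simp [splitNl]
  | cons c r ih =>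
    intro l hl
    by_cases hc : c = '\n'
    · subst hc
      simp only [splitNl, if_true] at hl
      rcases List.mem_cons.mp hl with h | h
      · simp [h]
      · exact ih l h
    · obtain ⟨h1, t1, hsp⟩ : ∃ h1 t1, splitNl r = h1 :: t1 := by
        cases hs : splitNl r with
        | nil => exact absurd hs (splitNl_ne_nil r)
        | cons a b => exact ⟨a, b, rfl⟩
      simp only [splitNl, hc, if_false, hsp] at hl
      rcases List.mem_cons.mp hl with h | h
      · subst h
        intro hmem
        rcases List.mem_cons.mp hmem with h' | h'
        · exact hc h'.symm
        · exact ih h1 (by rw [hsp]; simp) h'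
      · exact ih l (by rw [hsp]; simp [h])

-- find.go facts for the fixed pattern "\n["
theorem find_go_nil (k : Nat) : PySem.Chars.find.go ['\n', '['] [] k = -1 := by
  rw [PySem.Chars.find.go]; simp [List.isEmpty]

theorem find_go_shift (l : List Char) (k : Nat) :
    PySem.Chars.find.go ['\n', '['] l k =
      if PySem.Chars.find.go ['\n', '['] l 0 = -1 then -1 else (k : Int) + PySem.Chars.find.go ['\n', '['] l 0 := by
  induction l generalizing k with
  | nil => simp [find_go_nil]
  | cons c rest ih =>
    rw [PySem.Chars.find.go]
    conv_rhs => rw [PySem.Chars.find.go]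
    by_cases hp : (['\n', '['].isPrefixOf (c :: rest)) = true
    · simp [hp]
    · simp only [Bool.not_eq_true] at hp
      simp only [hp, Bool.false_eq_true, if_false]
      rw [ih (k + 1), ih 1]
      have h0 : -1 ≤ PySem.Chars.find rest ['\n', '['] := PySem.Chars.neg_one_le_find rest _
      unfold PySem.Chars.find at h0
      split_ifs <;> push_cast <;> omega

theorem find_go_nlfree (l : List Char) (h : '\n' ∉ l) (k : Nat) :
    PySem.Chars.find.go ['\n', '['] l k = -1 := by
  induction l generalizing k with
  | nil => exact find_go_nil k
  | cons c rest ih =>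
    rw [PySem.Chars.find.go]
    have hc : c ≠ '\n' := fun hh => h (by simp [hh])
    have : (['\n', '['].isPrefixOf (c :: rest)) = false := by
      simp [List.isPrefixOf]; intro hcc; exact absurd (by simpa using hcc.symm) hc
    simp only [this, Bool.false_eq_true, if_false]
    exact ih (fun hh => h (by simp [hh])) (k + 1)

theorem find_append_nl (l t' : List Char) (h : '\n' ∉ l) :
    PySem.Chars.find (l ++ '\n' :: t') ['\n', '['] =
      if ['['].isPrefixOf t' then (l.length : Int)
      else if PySem.Chars.find t' ['\n', '['] = -1 then -1
      else (l.length : Int) + 1 + PySem.Chars.find t' ['\n', '['] := by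
  unfold PySem.Chars.find
  suffices H : ∀ (l : List Char) (k : Nat), '\n' ∉ l →
      PySem.Chars.find.go ['\n', '['] (l ++ '\n' :: t') k =
        if ['['].isPrefixOf t' then ((k : Int) + l.length)
        else if PySem.Chars.find.go ['\n', '['] t' 0 = -1 then -1
        else (k : Int) + l.length + 1 + PySem.Chars.find.go ['\n', '['] t' 0 by
    have := H l 0 h
    simpa using this
  have h0 : -1 ≤ PySem.Chars.find.go ['\n', '['] t' 0 := by
    have := PySem.Chars.neg_one_le_find t' ['\n', '[']
    unfold PySem.Chars.find at this
    exact this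
  intro l
  induction l with
  | nil =>
    intro k _
    simp only [List.nil_append, List.length_nil]
    rw [PySem.Chars.find.go]
    have hpre : (['\n', '['].isPrefixOf ('\n' :: t')) = (['['].isPrefixOf t') := by
      simp [List.isPrefixOf]
    rw [hpre]
    by_cases hb : (['['].isPrefixOf t') = true
    · simp [hb]
    · simp only [Bool.not_eq_true] at hb
      simp only [hb, Bool.false_eq_true, if_false]
      rw [find_go_shift t' (k + 1)]
      split_ifs <;> push_cast <;> omega
  | cons c rest ih =>
    intro k hnl
    have hc : c ≠ '\n' := fun hh => hnl (by simp [hh])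
    simp only [List.cons_append]
    rw [PySem.Chars.find.go]
    have : (['\n', '['].isPrefixOf (c :: (rest ++ '\n' :: t'))) = false := by
      simp [List.isPrefixOf]; intro hcc; exact absurd (by simpa using hcc.symm) hc
    simp only [this, Bool.false_eq_true, if_false]
    rw [ih (k + 1) (fun hh => hnl (by simp [hh]))]
    simp only [List.length_cons]
    split_ifs <;> push_cast <;> omega

-- '[' starts the joined string iff it starts the first line
theorem br_prefix_join (h : List Char) (r : List (List Char)) :
    (['['].isPrefixOf (PySem.Chars.join ['\n'] (h :: r))) = (['['].isPrefixOf h) := by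
  cases h with
  | nil =>
    cases r with
    | nil => simp [PySem.Chars.join_singleton, List.isPrefixOf]
    | cons h2 r2 => simp [PySem.Chars.join_cons_cons, List.isPrefixOf]
  | cons c h' =>
    rw [join_cons_head]
    simp [List.isPrefixOf]

theorem exist_find_ne (r : List (List Char)) :
    ∀ h : List Char, '\n' ∉ h → (∀ l ∈ r, '\n' ∉ l) →
    (∃ l ∈ r, ['['].isPrefixOf l = true) →
    PySem.Chars.find (PySem.Chars.join ['\n'] (h :: r)) ['\n', '['] ≠ -1 := by
  induction r with
  | nil => intro h _ _ hex; simp at hex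
  | cons h2 r2 ih =>
    intro h hh hnl hex
    have hjoin : PySem.Chars.join ['\n'] (h :: h2 :: r2) = h ++ '\n' :: PySem.Chars.join ['\n'] (h2 :: r2) := by
      rw [PySem.Chars.join_cons_cons]; simp
    rw [hjoin, find_append_nl _ _ hh]
    by_cases hb : (['['].isPrefixOf (PySem.Chars.join ['\n'] (h2 :: r2))) = true
    · simp only [hb, if_true]
      omega
    · simp only [Bool.not_eq_true] at hb
      simp only [hb, Bool.false_eq_true, if_false]
      have hb2 : (['['].isPrefixOf h2) = false := by rw [← br_prefix_join h2 r2]; exact hb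
      have hex2 : ∃ l ∈ r2, ['['].isPrefixOf l = true := by
        rcases hex with ⟨l, hl, hpl⟩
        rcases List.mem_cons.mp hl with h' | h'
        · subst h'; rw [hb2] at hpl; exact absurd hpl (by simp)
        · exact ⟨l, h', hpl⟩
      have hne := ih h2 (hnl h2 (by simp)) (fun l hl => hnl l (by simp [hl])) hex2
      have hge := PySem.Chars.neg_one_le_find (PySem.Chars.join ['\n'] (h2 :: r2)) ['\n', '[']
      split
      · exact fun _ => hne (by assumption)
      · omega

theorem noocc_find_eq (M : List (List Char)) (hnl : ∀ l ∈ M, '\n' ∉ l)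
    (hnp : ∀ l ∈ M, (['['].isPrefixOf l) = false) :
    PySem.Chars.find (PySem.Chars.join ['\n'] M) ['\n', '['] = -1 := by
  induction M with
  | nil =>
    unfold PySem.Chars.find
    rw [PySem.Chars.join_nil, PySem.Chars.find.go]
    norm_num [List.isEmpty]
  | cons h r ih =>
    cases r with
    | nil =>
      rw [PySem.Chars.join_singleton]
      unfold PySem.Chars.find
      exact find_go_nlfree h (hnl h (by simp)) 0
    | cons h2 r2 =>
      have hjoin : PySem.Chars.join ['\n'] (h :: h2 :: r2) = h ++ '\n' :: PySem.Chars.join ['\n'] (h2 :: r2) := by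
        rw [PySem.Chars.join_cons_cons]; simp
      rw [hjoin, find_append_nl _ _ (hnl h (by simp))]
      have hb : (['['].isPrefixOf (PySem.Chars.join ['\n'] (h2 :: r2))) = false := by
        rw [br_prefix_join]; exact hnp h2 (by simp)
      rw [hb]
      have hr : PySem.Chars.find (PySem.Chars.join ['\n'] (h2 :: r2)) ['\n', '['] = -1 :=
        ih (fun l hl => hnl l (by simp [hl])) (fun l hl => hnp l (by simp [hl]))
      simp [hr]

theorem main_lemma (M : List (List Char)) (hne : M ≠ []) (hnl : ∀ l ∈ M, '\n' ∉ l) :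
    PySem.Chars.join ['\n'] (M.drop (kOf M)) = bC (PySem.Chars.join ['\n'] M) := by
  induction M with
  | nil => exact absurd rfl hne
  | cons h M' ih =>
    by_cases hp : (['['].isPrefixOf h) = true
    · have hk : kOf (h :: M') = 0 := by simp [kOf, List.findIdx?_cons, hp]
      rw [hk]
      have : (['['].isPrefixOf (PySem.Chars.join ['\n'] (h :: M'))) = true := by
        rw [br_prefix_join]; exact hp
      simp [bC, this]
    · simp only [Bool.not_eq_true] at hp
      cases M' with
      | nil =>
        have hk : kOf [h] = 0 := by simp [kOf, List.findIdx?_cons, hp]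
        rw [hk]
        simp only [List.drop_zero, PySem.Chars.join_singleton]
        have hf : PySem.Chars.find h ['\n', '['] = -1 :=
          find_go_nlfree h (hnl h (by simp)) 0
        simp [bC, hp, hf]
      | cons h2 r2 =>
        have hjoin : PySem.Chars.join ['\n'] (h :: h2 :: r2) = h ++ '\n' :: PySem.Chars.join ['\n'] (h2 :: r2) := by
          rw [PySem.Chars.join_cons_cons]; simp
        set t' := PySem.Chars.join ['\n'] (h2 :: r2) with ht'
        have hnt : (['['].isPrefixOf (h ++ '\n' :: t')) = false := by
          cases h with
          | nil => simp [List.isPrefixOf]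
          | cons c h0 =>
            simp only [List.isPrefixOf, List.cons_append] at hp ⊢
            simpa using hp
        have hfind := find_append_nl h t' (hnl h (by simp))
        have hih := ih (by simp) (fun l hl => hnl l (by simp [hl]))
        rw [hjoin]
        cases hidx : (h2 :: r2).findIdx? (fun l => ['['].isPrefixOf l) with
        | none =>
          have hk : kOf (h :: h2 :: r2) = 0 := by simp [kOf, List.findIdx?_cons, hp, hidx]
          have hnp : ∀ l ∈ h2 :: r2, (['['].isPrefixOf l) = false := by
            intro l hl
            have := List.findIdx?_eq_none_iff.mp hidx
            simpa using this l hl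
          have hf : PySem.Chars.find t' ['\n', '['] = -1 :=
            noocc_find_eq (h2 :: r2) (fun l hl => hnl l (by simp [hl])) hnp
          have hb : (['['].isPrefixOf t') = false := by rw [ht', br_prefix_join]; exact hnp h2 (by simp)
          rw [hf, hb] at hfind
          simp only [Bool.false_eq_true, if_false] at hfind
          rw [hk]
          simp [bC, hnt, hfind, hjoin]
        | some j =>
          have hk : kOf (h :: h2 :: r2) = j + 1 := by
            simp [kOf, List.findIdx?_cons, hp, hidx]
          have hk' : kOf (h2 :: r2) = j := by simp [kOf, hidx]
          rw [hk]
          have hdrop : (h :: h2 :: r2).drop (j + 1) = (h2 :: r2).drop j := by simp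
          rw [hdrop, ← hk', hih]
          -- now show bC t' = bC (h ++ '\n' :: t')
          by_cases hb : (['['].isPrefixOf t') = true
          · have : PySem.Chars.find (h ++ '\n' :: t') ['\n', '['] = (h.length : Int) := by
              rw [hfind, hb]; simp
            have hne' : PySem.Chars.find (h ++ '\n' :: t') ['\n', '['] ≠ -1 := by rw [this]; omega
            simp only [bC, hnt, Bool.false_eq_true, if_false, hb, if_true]
            rw [if_neg hne', this]
            have : ((h.length : Int) + 1).toNat = h.length + 1 := by omega
            rw [this]
            simp
          · simp only [Bool.not_eq_true] at hb
            rw [hb] at hfind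
            simp only [Bool.false_eq_true, if_false] at hfind
            have hb2 : (['['].isPrefixOf h2) = false := by rw [← br_prefix_join h2 r2]; exact hb
            have hex : ∃ l ∈ h2 :: r2, ['['].isPrefixOf l = true := by
              rcases List.findIdx?_eq_some_iff_getElem.mp hidx with ⟨hj, hp2, _⟩
              exact ⟨(h2 :: r2)[j], List.getElem_mem hj, hp2⟩
            have hfne : PySem.Chars.find t' ['\n', '['] ≠ -1 := by
              rw [ht']
              refine exist_find_ne r2 h2 (hnl h2 (by simp)) (fun l hl => hnl l (by simp [hl])) ?_
              rcases hex with ⟨l, hl, hpl⟩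
              rcases List.mem_cons.mp hl with h' | h'
              · subst h'; rw [hb2] at hpl; exact absurd hpl (by simp)
              · exact ⟨l, h', hpl⟩
            have hge : 0 ≤ PySem.Chars.find t' ['\n', '['] := by
              have := PySem.Chars.neg_one_le_find (s := t') (sub := ['\n', '['])
              omega
            rw [if_neg hfne] at hfind
            have hne' : PySem.Chars.find (h ++ '\n' :: t') ['\n', '['] ≠ -1 := by rw [hfind]; omega
            simp only [bC, hnt, Bool.false_eq_true, if_false]
            rw [if_neg hne', if_neg hfne, hfind]
            have harith : ((h.length : Int) + 1 + PySem.Chars.find t' ['\n', '['] + 1).toNat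
                = (h.length + 1) + (PySem.Chars.find t' ['\n', '['] + 1).toNat := by omega
            rw [harith]
            have hsplit2 : h ++ '\n' :: t' = (h ++ ['\n']) ++ t' := by simp
            have hlen2 : h.length + 1 = (h ++ ['\n']).length := by simp
            rw [hsplit2, hlen2, List.drop_length_add_append]
            simp [hb]

-- A's loop over enumerate at the list-of-lines level
theorem faLoop_enumerate (M : List (List Char)) (n : Int) :
    faLoop (PySem.List.enumerate (M.map String.ofList) n) =
      match M.findIdx? (fun l => ['['].isPrefixOf l) with
      | some j => n + j
      | none => 0 := by
  induction M generalizing n with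
  | nil => simp [faLoop, PySem.List.enumerate_nil]
  | cons h r ih =>
    simp only [List.map_cons, PySem.List.enumerate_cons, faLoop]
    have hsw : PySem.Str.startswith (String.ofList h) "[" = ['['].isPrefixOf h := by
      rw [PySem.Str.startswith_eq]
      simp [PySem.Chars.startswith]
    rw [hsw]
    by_cases hp : (['['].isPrefixOf h) = true
    · simp [List.findIdx?_cons, hp]
    · simp only [Bool.not_eq_true] at hp
      simp only [hp, Bool.false_eq_true, if_false]
      rw [ih (n + 1)]
      simp only [List.findIdx?_cons, hp, Bool.false_eq_true, if_false]
      cases hidx : r.findIdx? (fun l => ['['].isPrefixOf l) with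
      | none => simp
      | some j => simp; push_cast; ring

theorem format_os_query_result_eq (data : String) :
    format_os_query_result data = format_os_query_result_alt data := by
  apply String.toList_inj.mp
  have hsep : ("\n" : String).toList = ['\n'] := by decide
  have hsub : ("\n[" : String).toList = ['\n', '['] := by decide
  have hbr : ("[" : String).toList = ['['] := by decide
  set s := data.toList with hs
  set M := splitNl s with hM
  -- A side
  have hsplit : (PySem.Str.split? data "\n").getD [] = M.map String.ofList := by
    unfold PySem.Str.split?
    rw [hsep]
    unfold PySem.Chars.split?
    simp [splitOn_eq_splitNl, ← hs, ← hM]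
  have hk := faLoop_enumerate M 0
  have hkval : faLoop (PySem.List.enumerate (M.map String.ofList) 0) = (kOf M : Int) := by
    rw [hk]
    cases hidx : M.findIdx? (fun l => ['['].isPrefixOf l) with
    | none => simp [kOf, hidx]
    | some j => simp [kOf, hidx]
  have hA : (format_os_query_result data).toList = PySem.Chars.join ['\n'] (M.drop (kOf M)) := by
    show (PySem.Str.join "\n" (PySem.List.slice ((PySem.Str.split? data "\n").getD [])
        (some (faLoop (PySem.List.enumerate ((PySem.Str.split? data "\n").getD []) 0))) none)).toList = _
    rw [hsplit, hkval]
    rw [PySem.List.slice_from _ (by positivity)]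
    rw [PySem.Str.toList_join, hsep]
    rw [Int.toNat_natCast, ← List.map_drop]
    simp [List.map_map, Function.comp_def]
  -- B side
  have hB : (format_os_query_result_alt data).toList = bC s := by
    show (if PySem.Str.startswith data "[" then data
        else if PySem.Str.find data "\n[" = -1 then data
        else PySem.Str.slice data (some (PySem.Str.find data "\n[" + 1)) none).toList = bC s
    have hsw : PySem.Str.startswith data "[" = ['['].isPrefixOf s := by
      rw [PySem.Str.startswith_eq, hbr]
      simp [PySem.Chars.startswith, ← hs]
    have hfd : PySem.Str.find data "\n[" = PySem.Chars.find s ['\n', '['] := by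
      rw [PySem.Str.find_eq, hsub, ← hs]
    rw [hsw, hfd]
    unfold bC
    by_cases hp : (['['].isPrefixOf s) = true
    · simp only [hp, if_true]
      exact hs.symm
    · simp only [Bool.not_eq_true] at hp
      simp only [hp, Bool.false_eq_true, if_false]
      by_cases hf : PySem.Chars.find s ['\n', '['] = -1
      · simp only [hf, if_true]
        exact hs.symm
      · have hge : 0 ≤ PySem.Chars.find s ['\n', '['] := by
          have := PySem.Chars.neg_one_le_find s ['\n', '[']
          omega
        simp only [hf, if_false]
        rw [PySem.Str.toList_slice]
        unfold PySem.Chars.slice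
        rw [PySem.List.slice_from _ (by omega), ← hs]
  rw [hA, hB]
  have := main_lemma M (by rw [hM]; exact splitNl_ne_nil s) (by rw [hM]; exact splitNl_nlfree s)
  rw [this, hM, join_splitNl]

-- ===== VERDICT (by name: the statement is the Claim_ definition above) =====
theorem format_os_query_result_spec : Claim_equal_format_os_query_result := by
  intro data _
  unfold Spec_format_os_query_result
  exact format_os_query_result_eq data
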